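-- pv_equiv track=rewrite | github.com/songye38/2023_algorithm_study | 프로그래머스/2/60057. 문자열 압축/문자열 압축.py | get_split_num
-- ===== SOURCE A (Python) =====
-- def get_split_num(num:int,s:str):
--     result = {}
--     do_reset = False
--     answer = ""
--     result[s[:num]] = 1
--     for i in range(num,len(s),num): #s[i:i+num]
--         if s[i:i+num] not in result:
--             key = list(result.keys())[0]
--             count = str(result[key])
--             if count =='1':
--                 answer +=key
--             else:
--                 answer += str(result[key]) +key
--             result = {}
--             result[s[i:i+num]] = 1
--         else:
--             result[s[i:i+num]] += 1
--     if result: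
--         key = list(result.keys())[0]
--         count = str(result[key])
--         if count =='1':
--             answer +=key
--         else:
--             answer += str(result[key]) +key
--     return len(answer)
-- ===== SOURCE B (Python) =====
-- def get_split_num(num: int, s: str):
--     chunks = [s[:num]] + [s[i:i+num] for i in range(num, len(s), num)]
--     starts = [k for k, c in enumerate(chunks) if k == 0 or c != chunks[k - 1]]
--     ends = starts[1:] + [len(chunks)]
--     return sum(len(chunks[a]) + (len(str(b - a)) if b - a > 1 else 0)
--                for a, b in zip(starts, ends))
-- ===== Notes on version B (the rewrite author's own statement) =====
-- stated objective: alternative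
-- what changed: B is a staged declarative pipeline: it materialises the chunk list, then computes the run-boundary index list with an enumerate/filter comprehension (indices whose chunk differs from its predecessor), pairs each boundary with the next via zip, and sums the length contributions arithmetically - no mutable run state, no inner run scan, no string building, unlike A's one-pass single-key-dict run tracker that concatenates the compressed string and measures it.
import Mathlib
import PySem

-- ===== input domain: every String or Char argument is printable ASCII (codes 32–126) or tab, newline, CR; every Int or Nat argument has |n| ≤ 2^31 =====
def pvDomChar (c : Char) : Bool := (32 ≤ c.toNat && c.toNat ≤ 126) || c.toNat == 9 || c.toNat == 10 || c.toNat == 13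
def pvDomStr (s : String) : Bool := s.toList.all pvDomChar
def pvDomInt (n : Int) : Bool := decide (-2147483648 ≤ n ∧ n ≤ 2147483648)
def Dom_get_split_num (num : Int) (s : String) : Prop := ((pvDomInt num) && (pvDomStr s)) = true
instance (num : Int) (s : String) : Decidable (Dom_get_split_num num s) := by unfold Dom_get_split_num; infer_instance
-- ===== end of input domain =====

-- B replaces A's one-pass single-key-dict run tracker (which builds the compressed string and
-- measures it) by a staged pipeline: chunk list, then the run-boundary index list via
-- enumerate/filter, then an arithmetic sum over zipped boundary pairs (alternative, same cost).

-- ===== PORT A =====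
-- flush of the pending run: list(result.keys())[0], count, append to answer
def pvFlushA (result : PySem.Dict String Int) (answer : String) : String :=
  let key := PySem.List.pyGetD result.keys 0 ""
  let count := PySem.Int.toStr (result.getD key 0)
  if count == "1" then answer ++ key
  else answer ++ (PySem.Int.toStr (result.getD key 0) ++ key)

-- loop body of A, acting on the current chunk s[i:i+num]
def pvStepC (st : PySem.Dict String Int × String) (c : String) :
    PySem.Dict String Int × String :=
  if st.1.contains c = false then
    (PySem.Dict.empty.insert c 1, pvFlushA st.1 st.2)
  else
    (st.1.modify c 0 (· + 1), st.2)

def pvStepA (num : Int) (s : String) (st : PySem.Dict String Int × String) (i : Int) :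
    PySem.Dict String Int × String :=
  pvStepC st (PySem.Str.slice s (some i) (some (i + num)))

def get_split_num (num : Int) (s : String) : Int :=
  let st := (PySem.List.pyRange num (PySem.Str.len s) num).foldl (pvStepA num s)
    (PySem.Dict.empty.insert (PySem.Str.slice s none (some num)) 1, "")
  PySem.Str.len (if st.1.items.isEmpty then st.2 else pvFlushA st.1 st.2)

-- ===== PORT B =====
-- the comprehension's condition: k == 0 or chunks[k-1] != c
def pvCond (chunks : List String) (kc : Int × String) : Bool :=
  kc.1 == 0 || !(PySem.List.pyGetD chunks (kc.1 - 1) "" == kc.2)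

-- starts = [k for k, c in enumerate(chunks) if k == 0 or c != chunks[k-1]]
def pvStarts (chunks : List String) : List Int :=
  ((PySem.List.enumerate chunks 0).filter (pvCond chunks)).map (·.1)

-- ends = starts[1:] + [len(chunks)]
def pvEnds (chunks : List String) : List Int :=
  (pvStarts chunks).drop 1 ++ [(chunks.length : Int)]

-- one summand: len(chunks[a]) + (len(str(b-a)) if b-a > 1 else 0)
def pvPieceZ (chunks : List String) (ab : Int × Int) : Int :=
  PySem.Str.len (PySem.List.pyGetD chunks ab.1 "") +
    (if 1 < ab.2 - ab.1 then PySem.Str.len (PySem.Int.toStr (ab.2 - ab.1)) else 0)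

-- sum(... for a, b in zip(starts, ends))
def pvRunTotal (chunks : List String) : Int :=
  (((pvStarts chunks).zip (pvEnds chunks)).map (pvPieceZ chunks)).sum

def get_split_num_alt (num : Int) (s : String) : Int :=
  pvRunTotal (PySem.Str.slice s none (some num) ::
    (PySem.List.pyRange num (PySem.Str.len s) num).map
      (fun i => PySem.Str.slice s (some i) (some (i + num))))

-- ===== PRECONDITION & SPEC =====
-- num = 0 makes range(num, len(s), num) raise ValueError (zero step) in A, and B raises it identically.
def Pre_get_split_num (num : Int) (s : String) : Prop := num ≠ 0
instance (num : Int) (s : String) : Decidable (Pre_get_split_num num s) := by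
  unfold Pre_get_split_num; infer_instance

def pvWitness_get_split_num : Int × String := (2, "aabbaccc")

def Spec_get_split_num (num : Int) (s : String) (out : Int) : Prop := out = get_split_num_alt num s
instance (num : Int) (s : String) (out : Int) : Decidable (Spec_get_split_num num s out) := by unfold Spec_get_split_num; infer_instance

-- ===== CLAIM (what is proved, stated in full; the proofs are below) =====
def Claim_equal_get_split_num : Prop := ∀ (num : Int) (s : String), Dom_get_split_num num s → Pre_get_split_num num s → Spec_get_split_num num s (get_split_num num s)

-- ===== LEMMAS AND PROOFS =====

-- proof-side run-length decomposition of the chunk list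
def pvTakeRun (head : String) : List String → Nat × List String
  | [] => (0, [])
  | c :: rest =>
    if c == head then
      let r := pvTakeRun head rest
      (r.1 + 1, r.2)
    else (0, c :: rest)

theorem pvTakeRun_len_le (head : String) (l : List String) :
    (pvTakeRun head l).2.length ≤ l.length := by
  induction l with
  | nil => simp [pvTakeRun]
  | cons c rest ih =>
    by_cases h : c == head <;> simp [pvTakeRun, h] <;> omega

theorem pvTakeRun_spec (head : String) (l : List String) :
    l = List.replicate (pvTakeRun head l).1 head ++ (pvTakeRun head l).2 ∧
    (∀ c cs, (pvTakeRun head l).2 = c :: cs → (c == head) = false) := by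
  induction l with
  | nil => simp [pvTakeRun]
  | cons c rest ih =>
    by_cases h : (c == head) = true
    · have hc : c = head := by simpa using h
      subst hc
      simp only [pvTakeRun, h, if_true]
      refine ⟨?_, ih.2⟩
      conv_lhs => rw [ih.1]
      simp [List.replicate_succ]
    · simp only [pvTakeRun, h, if_false, Bool.false_eq_true]
      exact ⟨rfl, fun c' cs' he => by cases he; simpa using h⟩

-- length contribution of one run, with B's integer test
def pvPieceB (c : String) (m : Int) : Int :=
  PySem.Str.len c + (if m == 1 then 0 else PySem.Str.len (PySem.Int.toStr m))

-- length contribution of one run, with A's string test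
def pvPiece (c : String) (m : Int) : Int :=
  PySem.Str.len c +
    (if PySem.Int.toStr m == "1" then 0 else PySem.Str.len (PySem.Int.toStr m))

def pvCompressLen : List String → Int
  | [] => 0
  | head :: rest =>
    let r := pvTakeRun head rest
    pvPieceB head (1 + (r.1 : Int)) + pvCompressLen r.2
  termination_by l => l.length
  decreasing_by have := pvTakeRun_len_le head rest; simp; omega

theorem pvToDigitsCore_len_le (f : Nat) : ∀ (n : Nat) (l : List Char),
    l.length ≤ (Nat.toDigitsCore 10 f n l).length := by
  induction f with
  | zero => intro n l; simp [Nat.toDigitsCore]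
  | succ f ih =>
    intro n l
    simp only [Nat.toDigitsCore]
    split
    · simp
    · calc l.length ≤ ((n % 10).digitChar :: l).length := by simp
        _ ≤ _ := ih _ _

theorem pvToDigitsCore_pos (f n : Nat) (hf : 1 ≤ f) :
    1 ≤ (Nat.toDigitsCore 10 f n []).length := by
  cases f with
  | zero => omega
  | succ f =>
    simp only [Nat.toDigitsCore]
    split
    · simp
    · have := pvToDigitsCore_len_le f (n / 10) [(n % 10).digitChar]
      simpa using this

theorem pvToDigitsCore_two (f n : Nat) (hn : 10 ≤ n) (hf : n < f) :
    2 ≤ (Nat.toDigitsCore 10 f n []).length := by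
  cases f with
  | zero => omega
  | succ f =>
    simp only [Nat.toDigitsCore]
    rw [if_neg (by omega)]
    rw [Nat.toDigitsCore_lens_eq]
    have := pvToDigitsCore_pos f (n / 10) (by omega)
    omega

theorem pvToDigits_eq_one (m : Nat) (h : Nat.toDigits 10 m = ['1']) : m = 1 := by
  by_cases hm : m < 10
  · interval_cases m <;> (revert h; decide)
  · exfalso
    have hlen : (Nat.toDigits 10 m).length = 1 := by rw [h]; rfl
    unfold Nat.toDigits at hlen
    have := pvToDigitsCore_two (m + 1) m (by omega) (by omega)
    omega

theorem pvToStr_eq_one (n : Int) (h : 1 ≤ n) :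
    (PySem.Int.toStr n = "1") ↔ n = 1 := by
  constructor
  · intro he
    have h1 : (PySem.Int.toStr n).toList = "1".toList := by rw [he]
    rw [PySem.Int.toList_toStr] at h1
    have h2 : "1".toList = ['1'] := by decide
    rw [h2] at h1
    unfold PySem.Int.toChars at h1
    rw [if_neg (by omega)] at h1
    have := pvToDigits_eq_one n.toNat h1
    omega
  · intro he; subst he; decide

theorem pvPiece_eq (c : String) (m : Int) (h : 1 ≤ m) : pvPiece c m = pvPieceB c m := by
  unfold pvPiece pvPieceB
  by_cases hm : m = 1
  · subst hm
    rw [if_pos (by decide), if_pos (by decide)]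
  · rw [if_neg (show ¬((PySem.Int.toStr m == "1") = true) by
        simp only [beq_iff_eq]
        exact fun e => hm ((pvToStr_eq_one m h).1 e)),
      if_neg (by simp only [beq_iff_eq]; exact hm)]

theorem pvFlush_single (cur : String) (cnt : Int) (ans : String) :
    PySem.Str.len (pvFlushA ⟨[(cur, cnt)]⟩ ans) = PySem.Str.len ans + pvPiece cur cnt := by
  have hfind : List.find? (fun p => p.1 == cur) [(cur, cnt)] = some (cur, cnt) := by simp
  simp only [pvFlushA, PySem.Dict.keys, PySem.Dict.getD, PySem.Dict.get?, List.map_cons,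
    List.map_nil, PySem.List.pyGetD_zero_cons, hfind, Option.map_some, Option.getD_some, pvPiece]
  split_ifs <;> simp [PySem.Str.len_append] <;> ring

theorem pvMain (chunks : List String) : ∀ (cur : String) (cnt : Int) (ans : String),
    1 ≤ cnt →
    (let st := chunks.foldl pvStepC (⟨[(cur, cnt)]⟩, ans)
     PySem.Str.len (if st.1.items.isEmpty then st.2 else pvFlushA st.1 st.2))
      = PySem.Str.len ans + pvPiece cur (cnt + ((pvTakeRun cur chunks).1 : Int)) +
          pvCompressLen (pvTakeRun cur chunks).2 := by
  induction chunks with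
  | nil =>
    intro cur cnt ans h
    show PySem.Str.len (pvFlushA ⟨[(cur, cnt)]⟩ ans) = _
    rw [pvFlush_single]
    simp [pvTakeRun, pvCompressLen]
  | cons c cs ih =>
    intro cur cnt ans h
    by_cases hc : cur = c
    · subst hc
      have hstep : pvStepC (⟨[(cur, cnt)]⟩, ans) cur = (⟨[(cur, cnt + 1)]⟩, ans) := by
        simp [pvStepC, PySem.Dict.contains, PySem.Dict.modify, PySem.Dict.insert,
          PySem.Dict.getD, PySem.Dict.get?]
      simp only [List.foldl_cons, hstep]
      rw [ih cur (cnt + 1) ans (by omega)]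
      have ht : pvTakeRun cur (cur :: cs) = ((pvTakeRun cur cs).1 + 1, (pvTakeRun cur cs).2) := by
        simp [pvTakeRun]
      rw [ht]
      have harg : cnt + 1 + ((pvTakeRun cur cs).1 : Int)
           = cnt + (((pvTakeRun cur cs).1 + 1 : Nat) : Int) := by push_cast; ring
      rw [harg]
    · have hbc1 : (cur == c) = false := by simp only [beq_eq_false_iff_ne]; exact hc
      have hbc2 : (c == cur) = false := by
        simp only [beq_eq_false_iff_ne]; exact fun e => hc e.symm
      have hstep : pvStepC (⟨[(cur, cnt)]⟩, ans) c
          = (⟨[(c, 1)]⟩, pvFlushA ⟨[(cur, cnt)]⟩ ans) := by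
        simp [pvStepC, PySem.Dict.contains, PySem.Dict.insert, PySem.Dict.empty, hbc1]
      simp only [List.foldl_cons, hstep]
      rw [ih c 1 _ (by omega)]
      have ht : pvTakeRun cur (c :: cs) = (0, c :: cs) := by simp [pvTakeRun, hbc2]
      rw [ht, pvFlush_single]
      have hcl : pvCompressLen (c :: cs)
          = pvPieceB c (1 + ((pvTakeRun c cs).1 : Int)) + pvCompressLen (pvTakeRun c cs).2 := by
        rw [pvCompressLen]
      rw [hcl, ← pvPiece_eq c (1 + ((pvTakeRun c cs).1 : Int)) (by omega)]
      push_cast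
      ring

-- ---- B-side lemmas: the boundary pipeline computes the run decomposition ----

theorem pvEnumShift (xs : List String) : ∀ (a b : Int),
    PySem.List.enumerate xs (a + b) = (PySem.List.enumerate xs a).map (fun p => (p.1 + b, p.2)) := by
  induction xs with
  | nil => intro a b; simp [PySem.List.enumerate_nil]
  | cons x xs ih =>
    intro a b
    rw [PySem.List.enumerate_cons, PySem.List.enumerate_cons, List.map_cons]
    have : a + b + 1 = (a + 1) + b := by ring
    rw [this, ih (a + 1) b]

theorem pvChunks_getD_head (head : String) (r : Nat) (rest : List String)
    (k : Nat) (hk : k ≤ r) :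
    (head :: List.replicate r head ++ rest).getD k "" = head := by
  cases k with
  | zero => simp
  | succ k =>
    have hk' : k < r := by omega
    have hlen : k < (List.replicate r head).length := by simpa using hk'
    simp only [List.cons_append, List.getD_cons_succ]
    rw [List.getD_eq_getElem _ _ (by simp; omega)]
    rw [List.getElem_append_left hlen]
    simp

theorem pvChunks_getD_shift (head : String) (r : Nat) (rest : List String) (j : Nat) :
    (head :: List.replicate r head ++ rest).getD (r + 1 + j) "" = rest.getD j "" := by
  have h1 : r + 1 + j = (r + j) + 1 := by omega
  rw [h1]
  simp only [List.cons_append, List.getD_cons_succ]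
  rw [List.getD_append_right _ _ _ _ (by simp)]
  simp

theorem pvStarts_nonneg (l : List String) : ∀ x ∈ pvStarts l, 0 ≤ x := by
  intro x hx
  simp only [pvStarts, List.mem_map, List.mem_filter] at hx
  obtain ⟨p, ⟨hp, _⟩, rfl⟩ := hx
  rw [PySem.List.mem_enumerate_iff] at hp
  obtain ⟨k, hk, rfl⟩ := hp
  simp

theorem pvStarts_run (head : String) (r : Nat) (rest : List String)
    (hne : ∀ c cs, rest = c :: cs → (c == head) = false) :
    pvStarts (head :: List.replicate r head ++ rest)
      = 0 :: (pvStarts rest).map (· + ((r : Int) + 1)) := by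
  set chunks := head :: List.replicate r head ++ rest with hchunks
  have h0 : pvCond chunks (0, head) = true := by simp [pvCond]
  unfold pvStarts
  have henum : PySem.List.enumerate chunks 0 = (0, head) ::
        (PySem.List.enumerate (List.replicate r head) 1 ++
          PySem.List.enumerate rest (1 + ((List.replicate r head).length : Int))) := by
    rw [hchunks, List.cons_append, PySem.List.enumerate_cons, PySem.List.enumerate_append]
    norm_num
  rw [henum, List.filter_cons_of_pos h0, List.filter_append]
  have hrep : (PySem.List.enumerate (List.replicate r head) 1).filter (pvCond chunks) = [] := by
    rw [List.filter_eq_nil_iff]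
    intro p hp
    rw [PySem.List.mem_enumerate_iff] at hp
    obtain ⟨k, hk, rfl⟩ := hp
    simp only [List.length_replicate] at hk
    simp only [List.getElem_replicate]
    simp only [pvCond, Bool.or_eq_true, not_or]
    have hidx : (1 + (k : Int) - 1) = ((k : Nat) : Int) := by push_cast; ring
    rw [hidx]
    constructor
    · simp only [beq_iff_eq]
      intro he
      omega
    · rw [PySem.List.pyGetD_natCast, pvChunks_getD_head head r rest k (by omega)]
      simp
  rw [hrep, List.nil_append]
  have hshift : PySem.List.enumerate rest (1 + ((List.replicate r head).length : Int))
      = (PySem.List.enumerate rest 0).map (fun p => (p.1 + ((r : Int) + 1), p.2)) := by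
    have h5 : (1 : Int) + ((List.replicate r head).length : Int) = 0 + ((r : Int) + 1) := by
      simp; ring
    rw [h5, pvEnumShift]
  rw [hshift, List.filter_map]
  have hcong : (PySem.List.enumerate rest 0).filter
        (pvCond chunks ∘ fun p => (p.1 + ((r : Int) + 1), p.2))
      = (PySem.List.enumerate rest 0).filter (pvCond rest) := by
    apply List.filter_congr
    intro p hp
    rw [PySem.List.mem_enumerate_iff] at hp
    obtain ⟨k, hk, rfl⟩ := hp
    simp only [Function.comp_apply, zero_add]
    cases k with
    | zero =>
      have hh := hne rest[0] (rest.drop 1) (by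
        cases rest with
        | nil => simp at hk
        | cons a l => simp)
      simp [pvCond]
      right
      have hgd : chunks[r]?.getD "" = head := by
        rw [← List.getD_eq_getElem?_getD]
        exact pvChunks_getD_head head r rest r (le_refl r)
      rw [hgd]
      simp only [beq_eq_false_iff_ne] at hh
      exact fun e => hh e.symm
    | succ k =>
      have e1 : (((k + 1 : Nat) : Int) + ((r : Int) + 1)) - 1 = ((r + 1 + k : Nat) : Int) := by
        push_cast; ring
      have e2 : ((k + 1 : Nat) : Int) - 1 = ((k : Nat) : Int) := by push_cast; ring
      have e3 : ((((k + 1 : Nat) : Int) + ((r : Int) + 1)) == 0) = false := by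
        simp only [beq_eq_false_iff_ne]; push_cast; omega
      have e4 : (((k + 1 : Nat) : Int) == 0) = false := by
        simp only [beq_eq_false_iff_ne]; push_cast; omega
      simp only [pvCond, e1, e2, e3, e4, PySem.List.pyGetD_natCast]
      rw [hchunks, pvChunks_getD_shift head r rest k]
  rw [hcong, List.map_cons, List.map_map]
  simp [Function.comp_def]

theorem pvStarts_cons (c : String) (cs : List String) :
    pvStarts (c :: cs) = 0 :: ((PySem.List.enumerate cs 1).filter (pvCond (c :: cs))).map (·.1) := by
  unfold pvStarts
  rw [PySem.List.enumerate_cons, List.filter_cons_of_pos (by simp [pvCond]), List.map_cons]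
  norm_num

theorem pvGetD_shift_int (head : String) (r : Nat) (rest : List String) (a : Int) (ha : 0 ≤ a) :
    PySem.List.pyGetD (head :: List.replicate r head ++ rest) (a + ((r : Int) + 1)) ""
      = PySem.List.pyGetD rest a "" := by
  obtain ⟨j, rfl⟩ : ∃ j : Nat, a = (j : Int) := ⟨a.toNat, (Int.toNat_of_nonneg ha).symm⟩
  have h1 : ((j : Int) + ((r : Int) + 1)) = ((r + 1 + j : Nat) : Int) := by push_cast; ring
  rw [h1, PySem.List.pyGetD_natCast, PySem.List.pyGetD_natCast,
    pvChunks_getD_shift head r rest j]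

theorem pvRunTotal_eq (chunks : List String) : pvRunTotal chunks = pvCompressLen chunks := by
  fun_induction pvCompressLen chunks with
  | case1 => decide
  | case2 head t r ih =>
    obtain ⟨hdec, hne⟩ := pvTakeRun_spec head t
    have hr : pvTakeRun head t = r := rfl
    rw [hr] at hdec hne
    set m : Int := (r.1 : Int) + 1 with hm
    have hm1 : 1 ≤ m := by rw [hm]; omega
    have hlen' : (head :: t).length = r.1 + 1 + r.2.length := by
      conv_lhs => rw [hdec]
      simp [List.length_append]
      omega
    have hlenc : (((head :: t).length : Nat) : Int) = m + (r.2.length : Int) := by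
      rw [hlen', hm]; push_cast; ring
    have hrw : head :: t = head :: List.replicate r.1 head ++ r.2 := by
      rw [List.cons_append, hdec]
    have hstarts := pvStarts_run head r.1 r.2 hne
    rw [← hrw] at hstarts
    have hhead0 : PySem.List.pyGetD (head :: t) 0 "" = head := by
      simp [PySem.List.pyGetD_zero_cons]
    have hpiece0 : pvPieceZ (head :: t) (0, m) = pvPieceB head m := by
      unfold pvPieceZ pvPieceB
      rw [hhead0]
      simp only [sub_zero]
      by_cases h1 : m = 1
      · rw [if_neg (by omega), if_pos (by simp [h1])]
      · rw [if_pos (by omega), if_neg (by simp [h1])]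
    have hgshift : ∀ a : Int, 0 ≤ a →
        PySem.List.pyGetD (head :: t) (a + m) "" = PySem.List.pyGetD r.2 a "" := by
      intro a ha
      rw [hrw, hm]
      exact pvGetD_shift_int head r.1 r.2 a ha
    cases hr2 : r.2 with
    | nil =>
      rw [hr2] at hstarts
      unfold pvRunTotal pvEnds
      rw [hstarts]
      simp only [pvStarts, PySem.List.enumerate_nil, List.filter_nil, List.map_nil,
        List.drop_succ_cons, List.drop_nil, List.nil_append, List.zip_cons_cons,
        List.zip_nil_right, List.map_cons, List.map_nil, List.sum_cons, List.sum_nil]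
      rw [hlenc, hr2]
      simp only [List.length_nil, Nat.cast_zero, add_zero]
      have hnil : pvCompressLen [] = 0 := by rw [pvCompressLen]
      rw [hpiece0, hnil, hm]
      ring
    | cons c cs =>
      have hScons := pvStarts_cons c cs
      set L : List Int := ((PySem.List.enumerate cs 1).filter (pvCond (c :: cs))).map (·.1)
        with hL
      have hS' : pvStarts r.2 = 0 :: L := by rw [hr2, hScons]
      rw [hS'] at hstarts
      have hLnn : ∀ x ∈ (0 : Int) :: L, 0 ≤ x := by
        rw [← hS']; exact pvStarts_nonneg r.2
      -- starts (head::t) = 0 :: m :: L.map (+m)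
      have hstarts' : pvStarts (head :: t) = 0 :: ((0 :: L).map (· + m)) := by
        rw [hstarts, hm]
      have hends : pvEnds (head :: t)
          = ((0 :: L).map (· + m)) ++ [(((head :: t).length : Nat) : Int)] := by
        unfold pvEnds
        rw [hstarts']
        simp
      -- the zip decomposes
      have hmap0 : (0 :: L).map (· + m) = m :: L.map (· + m) := by simp
      have hlast : (L.map (· + m)) ++ [(((head :: t).length : Nat) : Int)]
          = (L ++ [(r.2.length : Int)]).map (· + m) := by
        rw [List.map_append, hlenc]
        simp [add_comm]
      have hzip : (pvStarts (head :: t)).zip (pvEnds (head :: t))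
          = (0, m) :: ((0 :: L).map (· + m)).zip ((L ++ [(r.2.length : Int)]).map (· + m)) := by
        rw [hstarts', hends, hmap0, List.cons_append, List.zip_cons_cons, ← hlast]
      unfold pvRunTotal
      rw [hzip, List.map_cons, List.sum_cons, hpiece0]
      rw [List.zip_map]
      rw [List.map_map]
      have hterm : ∀ ab ∈ (0 :: L).zip (L ++ [(r.2.length : Int)]),
          (pvPieceZ (head :: t) ∘ Prod.map (· + m) (· + m)) ab = pvPieceZ r.2 ab := by
        intro ab hab
        obtain ⟨a, b⟩ := ab
        have h1 : a ∈ (0 : Int) :: L := (List.of_mem_zip hab).1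
        have ha : 0 ≤ a := hLnn _ h1
        simp only [Function.comp_apply, Prod.map, pvPieceZ]
        rw [hgshift a ha]
        have he : b + m - (a + m) = b - a := by ring
        rw [he]
      rw [List.map_congr_left hterm]
      have hrt : ((pvStarts r.2).zip (pvEnds r.2)).map (pvPieceZ r.2)
          = ((0 :: L).zip (L ++ [(r.2.length : Int)])).map (pvPieceZ r.2) := by
        unfold pvEnds
        rw [hS']
        simp
      have ihv : pvRunTotal r.2 = pvCompressLen r.2 := ih
      unfold pvRunTotal at ihv
      rw [hrt] at ihv
      rw [ihv, ← hr2, hm, show ((r.1 : Int) + 1) = 1 + (r.1 : Int) from by ring]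

-- ===== VERDICT (by name: the statement is the Claim_ definition above) =====
theorem get_split_num_spec : Claim_equal_get_split_num := by
  intro num s _dom _pre
  unfold Spec_get_split_num
  unfold get_split_num get_split_num_alt
  have hfold :
      (PySem.List.pyRange num (PySem.Str.len s) num).foldl (pvStepA num s)
        (PySem.Dict.empty.insert (PySem.Str.slice s none (some num)) 1, "")
      = ((PySem.List.pyRange num (PySem.Str.len s) num).map
          (fun i => PySem.Str.slice s (some i) (some (i + num)))).foldl pvStepC
          (⟨[(PySem.Str.slice s none (some num), 1)]⟩, "") := by
    rw [List.foldl_map]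
    rfl
  simp only [hfold]
  rw [pvMain _ _ 1 "" (by omega)]
  rw [pvRunTotal_eq]
  rw [pvCompressLen]
  rw [pvPiece_eq _ _ (by omega)]
  have : PySem.Str.len "" = 0 := by decide
  rw [this]
  ring
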